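-- pv_equiv track=rewrite | github.com/PickAngE/AntiCheat-Scanner | checkers/matchers.py | path_has_folder_segment
-- ===== SOURCE A (Python) =====
-- def path_has_folder_segment(path_str: str, folder_signature: str) -> bool:
--     if not path_str or not folder_signature:
--         return False
--     path_norm = path_str.replace("/", "\\").lower()
--     sig_norm = folder_signature.replace("/", "\\").lower().strip()
--     if not sig_norm:
--         return False
--     parts = path_norm.rstrip("\\").split("\\")
--     sig_parts = sig_norm.rstrip("\\").split("\\")
--     for i in range(len(parts) - len(sig_parts) + 1):
--         if parts[i:i + len(sig_parts)] == sig_parts: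
--             return True
--     return False
-- ===== SOURCE B (Python) =====
-- def path_has_folder_segment(path_str: str, folder_signature: str) -> bool:
--     if not path_str or not folder_signature:
--         return False
--     path_norm = path_str.replace("/", "\\").lower()
--     sig_norm = folder_signature.replace("/", "\\").lower().strip()
--     if not sig_norm:
--         return False
--     parts = path_norm.rstrip("\\").split("\\")
--     sig_parts = sig_norm.rstrip("\\").split("\\")
--     haystack = "\\" + "\\".join(parts) + "\\"
--     needle = "\\" + "\\".join(sig_parts) + "\\"
--     return needle in haystack
-- ===== Notes on version B (the rewrite author's own statement) =====
-- stated objective: idiomatic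
-- what changed: Replaces the explicit window loop comparing list slices parts[i:i+k] against sig_parts with flattening both segment lists into backslash-delimited strings and a single substring test (needle in haystack), whose wrapping delimiters force segment-boundary alignment.
import Mathlib
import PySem

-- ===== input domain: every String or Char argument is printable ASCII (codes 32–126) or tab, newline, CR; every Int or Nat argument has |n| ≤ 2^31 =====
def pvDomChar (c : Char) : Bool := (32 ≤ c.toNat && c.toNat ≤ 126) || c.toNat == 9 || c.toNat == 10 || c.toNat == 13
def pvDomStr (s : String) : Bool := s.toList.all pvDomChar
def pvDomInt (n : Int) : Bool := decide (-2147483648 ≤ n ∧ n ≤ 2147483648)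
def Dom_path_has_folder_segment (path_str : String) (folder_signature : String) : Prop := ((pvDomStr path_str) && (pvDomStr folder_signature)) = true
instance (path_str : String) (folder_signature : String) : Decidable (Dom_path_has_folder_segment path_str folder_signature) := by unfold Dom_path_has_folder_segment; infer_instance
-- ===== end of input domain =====

-- B replaces A's windowed slice-comparison loop by flattening both segment lists into
-- backslash-delimited strings and doing a single substring test (idiomatic `needle in haystack`).


-- ===== PORT A =====
-- hand port of Python's s.rstrip("\\") (PySem has no rstrip-with-chars form); exact:
-- it removes exactly the maximal trailing run of '\\' characters.
def pvRstripBackslash (cs : List Char) : List Char :=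
  (cs.reverse.dropWhile (· == '\\')).reverse

def path_has_folder_segment (path_str : String) (folder_signature : String) : Bool :=
  -- if not path_str or not folder_signature: return False
  if path_str.toList.isEmpty || folder_signature.toList.isEmpty then false
  else
    let path_norm := PySem.Chars.lower (PySem.Chars.replace path_str.toList ['/'] ['\\'])
    let sig_norm := PySem.Chars.strip (PySem.Chars.lower (PySem.Chars.replace folder_signature.toList ['/'] ['\\']))
    if sig_norm.isEmpty then false
    else
      let parts := PySem.Chars.splitOn (pvRstripBackslash path_norm) ['\\']
      let sig_parts := PySem.Chars.splitOn (pvRstripBackslash sig_norm) ['\\']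
      -- for i in range(len(parts) - len(sig_parts) + 1): if parts[i:i+len(sig_parts)] == sig_parts: return True
      (PySem.List.pyRange 0 ((parts.length : Int) - (sig_parts.length : Int) + 1) 1).any
        (fun i => decide (PySem.List.slice parts (some i) (some (i + (sig_parts.length : Int))) = sig_parts))

-- ===== PORT B =====
def path_has_folder_segment_alt (path_str : String) (folder_signature : String) : Bool :=
  if path_str.toList.isEmpty || folder_signature.toList.isEmpty then false
  else
    let path_norm := PySem.Chars.lower (PySem.Chars.replace path_str.toList ['/'] ['\\'])
    let sig_norm := PySem.Chars.strip (PySem.Chars.lower (PySem.Chars.replace folder_signature.toList ['/'] ['\\']))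
    if sig_norm.isEmpty then false
    else
      let parts := PySem.Chars.splitOn (pvRstripBackslash path_norm) ['\\']
      let sig_parts := PySem.Chars.splitOn (pvRstripBackslash sig_norm) ['\\']
      -- haystack = "\\" + "\\".join(parts) + "\\" ; needle = "\\" + "\\".join(sig_parts) + "\\"
      let haystack := '\\' :: PySem.Chars.join ['\\'] parts ++ ['\\']
      let needle := '\\' :: PySem.Chars.join ['\\'] sig_parts ++ ['\\']
      -- return needle in haystack
      PySem.Chars.isIn needle haystack

-- ===== PRECONDITION & SPEC =====
def Spec_path_has_folder_segment (path_str : String) (folder_signature : String) (out : Bool) : Prop := out = path_has_folder_segment_alt path_str folder_signature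
instance (path_str : String) (folder_signature : String) (out : Bool) : Decidable (Spec_path_has_folder_segment path_str folder_signature out) := by unfold Spec_path_has_folder_segment; infer_instance

-- ===== CLAIM (what is proved, stated in full; the proofs are below) =====
def Claim_equal_path_has_folder_segment : Prop := ∀ (path_str : String) (folder_signature : String), Dom_path_has_folder_segment path_str folder_signature → Spec_path_has_folder_segment path_str folder_signature (path_has_folder_segment path_str folder_signature)

-- ===== LEMMAS AND PROOFS =====

-- each segment followed by one delimiter, flattened ("wrap"): '\\' :: pvW P is B's delimited string
def pvW (P : List (List Char)) : List Char := (P.map (· ++ ['\\'])).flatten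

theorem pvW_join_aux (P : List (List Char)) (h : P ≠ []) :
    List.intercalate ['\\'] P ++ ['\\'] = pvW P := by
  induction P with
  | nil => simp at h
  | cons a t ih =>
    cases t with
    | nil => simp [pvW, List.intercalate]
    | cons b t' =>
      have h2 : List.intercalate ['\\'] (a::b::t') = a ++ ['\\'] ++ List.intercalate ['\\'] (b::t') := by
        simp [List.intercalate, List.intersperse]
      rw [h2, List.append_assoc, List.append_assoc, ih (by simp)]
      simp [pvW]

theorem pvW_join (P : List (List Char)) (h : P ≠ []) :
    '\\' :: PySem.Chars.join ['\\'] P ++ ['\\'] = '\\' :: pvW P := by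
  rw [List.cons_append, show PySem.Chars.join ['\\'] P = List.intercalate ['\\'] P from rfl,
    pvW_join_aux P h]

theorem pvW_ne_nil (S : List (List Char)) (h : S ≠ []) : pvW S ≠ [] := by
  cases S with
  | nil => simp at h
  | cons a t => simp [pvW]

theorem pvW_ends (A : List (List Char)) (h : A ≠ []) : ∃ t, pvW A = t ++ ['\\'] := by
  induction A with
  | nil => simp at h
  | cons a t ih =>
    cases t with
    | nil => exact ⟨a, by simp [pvW]⟩
    | cons b t' =>
      obtain ⟨u, hu⟩ := ih (by simp)
      exact ⟨a ++ ['\\'] ++ u, by simp [pvW] at hu ⊢; simp [hu]⟩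

theorem pvW_prefix (S P : List (List Char)) (hS : ∀ p ∈ S, '\\' ∉ p) (hP : ∀ p ∈ P, '\\' ∉ p) :
    pvW S <+: pvW P ↔ S <+: P := by
  induction S generalizing P with
  | nil => simp [pvW]
  | cons s S' ih =>
    cases P with
    | nil =>
      constructor
      · intro hp
        exact absurd (List.prefix_nil.mp hp) (pvW_ne_nil _ (by simp))
      · intro hp; exact absurd (List.prefix_nil.mp (by exact_mod_cast hp)) (by simp)
    | cons p P' =>
      have hsd : '\\' ∉ s := hS s (by simp)
      have hpd : '\\' ∉ p := hP p (by simp)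
      constructor
      · intro hp
        -- pvW (s::S') = s ++ '\\' :: pvW S'
        have e1 : pvW (s :: S') = s ++ '\\' :: pvW S' := by simp [pvW]
        have e2 : pvW (p :: P') = p ++ '\\' :: pvW P' := by simp [pvW]
        rw [e1, e2] at hp
        -- first, lengths of s and p agree
        have hlen : s.length = p.length := by
          by_contra hne
          rcases Nat.lt_or_ge s.length p.length with hlt | hge
          · have hidx : s.length < (s ++ '\\' :: pvW S').length := by simp
            have := hp.getElem (i := s.length) hidx
            -- LHS at s.length is '\\', RHS is p[s.length]
            have hl : (s ++ '\\' :: pvW S')[s.length]'hidx = '\\' := by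
              simp [List.getElem_append_right (Nat.le_refl s.length)]
            have hr : (p ++ '\\' :: pvW P')[s.length]'(by simp; omega) = p[s.length]'hlt := by
              simp [List.getElem_append_left hlt]
            have hv : p[s.length]'hlt = '\\' := hr.symm.trans (this.symm.trans hl)
            exact hpd (hv ▸ List.getElem_mem hlt)
          · have hlt : p.length < s.length := by omega
            have hidx : p.length < (s ++ '\\' :: pvW S').length := by simp; omega
            have := hp.getElem (i := p.length) hidx
            have hl : (s ++ '\\' :: pvW S')[p.length]'hidx = s[p.length]'hlt := by
              simp [List.getElem_append_left hlt]
            have hr : (p ++ '\\' :: pvW P')[p.length]'(by simp) = '\\' := by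
              simp [List.getElem_append_right (Nat.le_refl p.length)]
            have hv : s[p.length]'hlt = '\\' := hl.symm.trans (this.trans hr)
            exact hsd (hv ▸ List.getElem_mem hlt)
        obtain ⟨r, hr⟩ := hp
        have hr' : s ++ ('\\' :: (pvW S' ++ r)) = p ++ ('\\' :: pvW P') := by
          simpa [List.append_assoc] using hr
        obtain ⟨hsp, htl⟩ := List.append_inj hr' hlen
        have htl' : pvW S' ++ r = pvW P' := by simpa using htl
        have hpre : pvW S' <+: pvW P' := ⟨r, htl'⟩
        have hrec := (ih P' (fun q hq => hS q (by simp [hq])) (fun q hq => hP q (by simp [hq]))).mp hpre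
        exact List.cons_prefix_cons.mpr ⟨hsp, hrec⟩
      · intro hp
        obtain ⟨rfl, htail⟩ := List.cons_prefix_cons.mp hp
        obtain ⟨r, hr⟩ := htail
        refine ⟨pvW r, ?_⟩
        rw [← hr]
        simp [pvW]

theorem pvW_infix (S P : List (List Char)) (hS : ∀ p ∈ S, '\\' ∉ p) (hP : ∀ p ∈ P, '\\' ∉ p)
    (hSne : S ≠ []) :
    ('\\' :: pvW S) <:+: ('\\' :: pvW P) ↔ S <:+: P := by
  constructor
  · intro h
    induction P with
    | nil =>
      exfalso
      have hlen := h.length_le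
      have : pvW S ≠ [] := pvW_ne_nil S hSne
      rw [show pvW ([] : List (List Char)) = [] from by simp [pvW]] at hlen
      simp only [List.length_cons, List.length_nil] at hlen
      exact pvW_ne_nil S hSne (List.length_eq_zero_iff.mp (by omega))
    | cons p P' IH =>
      have hpd : '\\' ∉ p := hP p (by simp)
      obtain ⟨t, hpre, hsuf⟩ := List.infix_iff_prefix_suffix.mp h
      obtain ⟨j, hj⟩ : ∃ j, ('\\' :: pvW (p :: P')).drop j = t :=
        ⟨_, (List.suffix_iff_eq_drop.mp hsuf).symm⟩
      rw [← hj] at hpre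
      have e2 : pvW (p :: P') = p ++ '\\' :: pvW P' := by simp [pvW]
      cases j with
      | zero =>
        simp at hpre
        exact ((pvW_prefix S (p :: P') hS hP).mp hpre).isInfix
      | succ k =>
        rw [List.drop_succ_cons, e2] at hpre
        -- hpre : '\\' :: pvW S <+: (p ++ '\\' :: pvW P').drop k
        by_cases hk : k < p.length
        · exfalso
          have hd : k < (p ++ '\\' :: pvW P').length := by simp; omega
          have h0 := hpre.getElem (i := 0) (by simp)
          simp only [List.getElem_cons_zero] at h0
          rw [List.getElem_drop] at h0
          have h2 : (p ++ '\\' :: pvW P')[k + 0]'(by simp; omega) = p[k]'hk := by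
            simpa using (List.getElem_append_left hk (h' := by simp; omega))
          exact hpd ((h2.symm.trans h0.symm) ▸ List.getElem_mem hk)
        · have hdrop : (p ++ '\\' :: pvW P').drop k = ('\\' :: pvW P').drop (k - p.length) := by
            rw [List.drop_append, List.drop_of_length_le (by omega)]
            simp
          rw [hdrop] at hpre
          have hinf : ('\\' :: pvW S) <:+: ('\\' :: pvW P') :=
            hpre.isInfix.trans (List.drop_suffix _ _).isInfix
          exact (IH (fun q hq => hP q (by simp [hq])) hinf).trans (List.infix_cons (List.infix_refl P'))
  · intro h
    obtain ⟨A, B, hAB⟩ := h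
    cases A with
    | nil =>
      refine ⟨[], pvW B, ?_⟩
      simp only [← hAB, List.nil_append]
      simp [pvW]
    | cons a A' =>
      obtain ⟨t, ht⟩ := pvW_ends (a :: A') (by simp)
      refine ⟨'\\' :: t, pvW B, ?_⟩
      rw [← hAB]
      have : pvW ((a :: A') ++ S ++ B) = pvW (a :: A') ++ pvW S ++ pvW B := by
        simp [pvW]
      rw [this, ht]
      simp

theorem go_ne_nil (sep : List Char) (fuel : Nat) (l cur : List Char) (acc : List (List Char)) :
    PySem.Chars.splitOn.go sep fuel l cur acc ≠ [] := by
  induction fuel generalizing l cur acc with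
  | zero => simp [PySem.Chars.splitOn.go]
  | succ f ih =>
    cases l with
    | nil => simp [PySem.Chars.splitOn.go]
    | cons c rest =>
      rw [PySem.Chars.splitOn.go]
      split
      · exact ih _ _ _
      · exact ih _ _ _

theorem go_dfree (fuel : Nat) (l cur : List Char) (acc : List (List Char))
    (hf : l.length < fuel) (hcur : '\\' ∉ cur) (hacc : ∀ p ∈ acc, '\\' ∉ p) :
    ∀ p ∈ PySem.Chars.splitOn.go ['\\'] fuel l cur acc, '\\' ∉ p := by
  induction fuel generalizing l cur acc with
  | zero => omega
  | succ f ih =>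
    cases l with
    | nil =>
      rw [PySem.Chars.splitOn.go]
      intro p hp
      simp at hp
      rcases hp with hp | rfl
      · exact hacc p hp
      · simpa using hcur
      all_goals omega
    | cons c rest =>
      rw [PySem.Chars.splitOn.go]
      split
      · -- sep is a prefix: c = '\\'
        refine ih _ _ _ (by simp at hf ⊢; omega) (by simp) ?_
        intro p hp
        simp at hp
        rcases hp with rfl | hp
        · simpa using hcur
        · exact hacc p hp
      · -- c ≠ '\\'
        rename_i hnp
        have hc : c ≠ '\\' := by
          intro rfl_c
          apply hnp
          subst rfl_c
          simp [List.isPrefixOf]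
        refine ih _ _ _ (by simp at hf ⊢; omega) ?_ hacc
        simp [hcur]
        exact fun h => hc h.symm

theorem loopA_iff (P S : List (List Char)) :
    ((PySem.List.pyRange 0 ((P.length : Int) - (S.length : Int) + 1) 1).any
        (fun i => decide (PySem.List.slice P (some i) (some (i + (S.length : Int))) = S)) = true)
      ↔ S <:+: P := by
  rw [List.any_eq_true]
  constructor
  · rintro ⟨i, hmem, hdec⟩
    obtain ⟨h0, _⟩ := PySem.List.mem_pyRange_one.mp hmem
    obtain ⟨j, rfl⟩ := Int.eq_ofNat_of_zero_le h0
    rw [show (j : Int) + (S.length : Int) = ((j + S.length : Nat) : Int) by push_cast; ring,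
      PySem.List.slice_natCast] at hdec
    have hslice := of_decide_eq_true hdec
    rw [Nat.add_sub_cancel_left] at hslice
    exact (hslice ▸ (List.take_prefix _ _)).isInfix.trans (List.drop_suffix _ _).isInfix
  · rintro ⟨A, B, hAB⟩
    refine ⟨(A.length : Int), ?_, ?_⟩
    · refine PySem.List.mem_pyRange_one.mpr ⟨by positivity, ?_⟩
      have : P.length = A.length + S.length + B.length := by rw [← hAB]; simp; omega
      omega
    · rw [show (A.length : Int) + (S.length : Int) = ((A.length + S.length : Nat) : Int) by push_cast; ring,
        PySem.List.slice_natCast, Nat.add_sub_cancel_left]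
      rw [← hAB, List.append_assoc, List.drop_left, List.take_left]
      simp

theorem splitOn_ne_nil (s : List Char) : PySem.Chars.splitOn s ['\\'] ≠ [] := by
  simp [PySem.Chars.splitOn]; exact go_ne_nil _ _ _ _ _

theorem splitOn_dfree (s : List Char) : ∀ p ∈ PySem.Chars.splitOn s ['\\'], '\\' ∉ p := by
  simp only [PySem.Chars.splitOn]
  exact go_dfree _ _ _ _ (by omega) (by simp) (by simp)

-- ===== VERDICT (by name: the statement is the Claim_ definition above) =====
theorem path_has_folder_segment_spec : Claim_equal_path_has_folder_segment := by
  intro path_str folder_signature _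
  unfold Spec_path_has_folder_segment path_has_folder_segment path_has_folder_segment_alt
  dsimp only
  split
  · rfl
  · split
    · rfl
    · rw [Bool.eq_iff_iff]
      rw [loopA_iff _ _, PySem.Chars.isIn_iff_infix,
        pvW_join _ (splitOn_ne_nil _), pvW_join _ (splitOn_ne_nil _),
        pvW_infix _ _ (splitOn_dfree _) (splitOn_dfree _) (splitOn_ne_nil _)]
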